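-- pv_equiv track=rewrite | github.com/Arsen1302/Code-copy-detector | TestData/solutions/problem_1710_4.py | solution_1710_4
-- ===== SOURCE A (Python) =====
-- from typing import List
--
-- def solution_1710_4(nums: List[int]) -> List[int]:
--
--     #apply the operations
--     for idx, num in enumerate(nums[1:]):
--         if nums[idx] == num:
--             nums[idx] *= 2
--             nums[idx+1] = 0
--
--     # find the first zero
--     for first_zero, num in enumerate(nums):
--         if not num: break
--
--     # check if there are any to shift
--     if first_zero == len(nums) - 1: return nums
--
--     # go through the array and shift numbers to the left
--     for idx, num in enumerate(nums[first_zero+1:], first_zero+1):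
--
--         # we found a valid number after the zero so we need to switch it
--         if num:
--             nums[first_zero] = num
--             nums[idx] = 0
--
--         # go further with our first zero counter
--         while first_zero < len(nums) and nums[first_zero]:
--             first_zero += 1
--
--         # check if we went out of bounds
--         if first_zero > len(nums) - 1: break
--
--     return nums
-- ===== SOURCE B (Python) =====
-- from typing import List
--
-- def solution_1710_4(nums: List[int]) -> List[int]:
--     # merge equal adjacent pairs (reading the right operand from the original values)
--     out = list(nums)
--     for i in range(len(nums) - 1):
--         if out[i] == nums[i + 1]:
--             out[i] *= 2
--             out[i + 1] = 0
--     # stable-compact: nonzeros first, pad with zeros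
--     res = [x for x in out if x]
--     nums[:] = res + [0] * (len(out) - len(res))
--     return nums
-- ===== Notes on version B (the rewrite author's own statement) =====
-- stated objective: simpler
-- what changed: B keeps the adjacent-merge pass but replaces A's first-zero scan, early-return guard and two-pointer in-place swap compaction by a single filter of the nonzero elements padded with zeros.
import Mathlib
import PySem

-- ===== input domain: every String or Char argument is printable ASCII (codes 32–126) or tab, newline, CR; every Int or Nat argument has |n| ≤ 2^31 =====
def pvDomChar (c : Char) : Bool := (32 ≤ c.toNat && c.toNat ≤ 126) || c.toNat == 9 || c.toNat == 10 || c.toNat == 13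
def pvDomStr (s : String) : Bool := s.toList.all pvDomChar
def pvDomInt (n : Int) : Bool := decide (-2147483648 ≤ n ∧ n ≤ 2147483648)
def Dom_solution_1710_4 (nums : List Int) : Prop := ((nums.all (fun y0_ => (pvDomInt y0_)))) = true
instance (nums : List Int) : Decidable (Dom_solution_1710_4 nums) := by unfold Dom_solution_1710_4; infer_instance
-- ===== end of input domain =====

-- B replaces A's two-pointer in-place zero-shifting loop (first-zero scan, early return, swap
-- compaction) by a filter-and-pad rebuild after the merge pass: simpler, same return value.
-- (Both Pythons also mutate `nums` to the returned contents; the theorems are about the return value.)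

-- ===== PORT A =====
-- while first_zero < len(nums) and nums[first_zero]: first_zero += 1
def pvAdvance (cur : List Int) (fz : Int) : Int :=
  if h : fz < (cur.length : Int) ∧ PySem.List.pyGetD cur fz 0 ≠ 0 then pvAdvance cur (fz + 1)
  else fz
termination_by ((cur.length : Int) - fz).toNat
decreasing_by omega

-- for first_zero, num in enumerate(nums): if not num: break   (result: the loop variable's final value)
def pvFirstZero : List Int → Int → Int
  | [], i => i - 1
  | x :: xs, i => if x = 0 then i else pvFirstZero xs (i + 1)

-- one iteration of A's shifting loop; the Bool flag records that `break` has happened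
def pvShiftStep (n : Nat) (s : List Int × Int × Bool) (p : Int × Int) : List Int × Int × Bool :=
  if s.2.2 then s
  else
    let cur := if p.2 ≠ 0 then PySem.List.pySetD (PySem.List.pySetD s.1 s.2.1 p.2) p.1 0 else s.1
    let fz := pvAdvance cur s.2.1
    (cur, fz, decide (fz > (n : Int) - 1))

def solution_1710_4 (nums : List Int) : List Int :=
  -- for idx, num in enumerate(nums[1:]): if nums[idx] == num: nums[idx] *= 2; nums[idx+1] = 0
  let merged := (PySem.List.enumerate (PySem.List.slice nums (some 1) none)).foldl
      (fun a p => if PySem.List.pyGetD a p.1 0 = p.2 then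
          PySem.List.pySetD (PySem.List.pySetD a p.1 (PySem.List.pyGetD a p.1 0 * 2)) (p.1 + 1) 0
        else a) nums
  let fz0 := pvFirstZero merged 0
  if fz0 = (merged.length : Int) - 1 then merged
  else
    ((PySem.List.enumerate (PySem.List.slice merged (some (fz0 + 1)) none) (fz0 + 1)).foldl
      (pvShiftStep merged.length) (merged, fz0, false)).1

-- ===== PORT B =====
def solution_1710_4_alt (nums : List Int) : List Int :=
  -- out = list(nums); for i in range(len(nums)-1): if out[i] == nums[i+1]: out[i] *= 2; out[i+1] = 0
  let out := (PySem.List.pyRange 0 ((nums.length : Int) - 1) 1).foldl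
      (fun a i => if PySem.List.pyGetD a i 0 = PySem.List.pyGetD nums (i + 1) 0 then
          PySem.List.pySetD (PySem.List.pySetD a i (PySem.List.pyGetD a i 0 * 2)) (i + 1) 0
        else a) nums
  -- res = [x for x in out if x]; nums[:] = res + [0]*(len(out)-len(res))
  let res := out.filter (fun x => decide (x ≠ 0))
  res ++ List.replicate (out.length - res.length) 0

-- ===== PRECONDITION & SPEC =====
-- Pre_ excludes only the empty list, on which Python A raises UnboundLocalError.
def Pre_solution_1710_4 (nums : List Int) : Prop := nums ≠ []
instance (nums : List Int) : Decidable (Pre_solution_1710_4 nums) := by unfold Pre_solution_1710_4; infer_instance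
def pvWitness_solution_1710_4 : List Int := [1, 2, 2, 0, 3]

def Spec_solution_1710_4 (nums : List Int) (out : List Int) : Prop := out = solution_1710_4_alt nums
instance (nums : List Int) (out : List Int) : Decidable (Spec_solution_1710_4 nums out) := by unfold Spec_solution_1710_4; infer_instance

-- ===== CLAIM (what is proved, stated in full; the proofs are below) =====
def Claim_equal_solution_1710_4 : Prop := ∀ (nums : List Int), Dom_solution_1710_4 nums → Pre_solution_1710_4 nums → Spec_solution_1710_4 nums (solution_1710_4 nums)

-- ===== LEMMAS AND PROOFS =====

-- the common merge pass both ports compute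
def pvMergeRef (nums : List Int) : List Int :=
  (List.range (nums.length - 1)).foldl
    (fun a k => if a.getD k 0 = nums.getD (k + 1) 0 then
        (a.set k (a.getD k 0 * 2)).set (k + 1) 0
      else a) nums

lemma mergeA_eq (nums : List Int) :
    (PySem.List.enumerate (PySem.List.slice nums (some 1) none)).foldl
      (fun a p => if PySem.List.pyGetD a p.1 0 = p.2 then
          PySem.List.pySetD (PySem.List.pySetD a p.1 (PySem.List.pyGetD a p.1 0 * 2)) (p.1 + 1) 0
        else a) nums = pvMergeRef nums := by
  rw [PySem.List.slice_from_one, PySem.List.enumerate_eq_map_pyRange nums.tail 0, List.foldl_map]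
  have : PySem.List.len nums.tail = ((nums.length - 1 : Nat) : Int) := by
    simp [PySem.List.len_eq]
  rw [this, PySem.List.pyRange_zero_natCast, List.foldl_map, pvMergeRef]
  congr 1
  funext a k
  have h1 : ((k : Int) + 1) = ((k + 1 : Nat) : Int) := by push_cast; ring
  have h2 : nums.tail.getD k 0 = nums.getD (k + 1) 0 := by cases nums <;> simp [List.getD]
  simp only [h1, PySem.List.pyGetD_natCast, PySem.List.pySetD_natCast, h2]

lemma mergeB_eq (nums : List Int) :
    (PySem.List.pyRange 0 ((nums.length : Int) - 1) 1).foldl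
      (fun a i => if PySem.List.pyGetD a i 0 = PySem.List.pyGetD nums (i + 1) 0 then
          PySem.List.pySetD (PySem.List.pySetD a i (PySem.List.pyGetD a i 0 * 2)) (i + 1) 0
        else a) nums = pvMergeRef nums := by
  rcases nums with _ | ⟨x, xs⟩
  · simp [PySem.List.pyRange, pvMergeRef]
  · have hb : (((x :: xs).length : Int)) - 1 = (((x :: xs).length - 1 : Nat) : Int) := by simp
    rw [hb, PySem.List.pyRange_zero_natCast, List.foldl_map, pvMergeRef]
    congr 1
    funext a k
    have h1 : ((k : Int) + 1) = ((k + 1 : Nat) : Int) := by push_cast; ring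
    simp only [h1, PySem.List.pyGetD_natCast, PySem.List.pySetD_natCast]

lemma pvFirstZero_eq (l : List Int) : ∀ (i : Int),
    pvFirstZero l i = match l.findIdx? (fun x => decide (x = 0)) with
      | some k => i + k
      | none => i + l.length - 1 := by
  induction l with
  | nil => intro i; simp [pvFirstZero]
  | cons x xs ih =>
    intro i
    by_cases hx : x = 0
    · simp [pvFirstZero, hx, List.findIdx?_cons]
    · rw [pvFirstZero]
      simp only [hx, if_false, List.findIdx?_cons, decide_eq_true_eq, ih (i + 1)]
      rcases h : xs.findIdx? (fun x => decide (x = 0)) with _ | k <;> simp <;> push_cast <;> ring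

lemma pvFirstZero_none (l : List Int) (i : Int) (h : l.findIdx? (fun x => decide (x = 0)) = none) :
    pvFirstZero l i = i + l.length - 1 := by
  rw [pvFirstZero_eq, h]

lemma pvFirstZero_some (l : List Int) (i : Int) (k : Nat) (h : l.findIdx? (fun x => decide (x = 0)) = some k) :
    pvFirstZero l i = i + k := by
  rw [pvFirstZero_eq, h]

lemma pvAdvance_stop (cur : List Int) (fz : Int)
    (h : ¬(fz < (cur.length : Int) ∧ PySem.List.pyGetD cur fz 0 ≠ 0)) : pvAdvance cur fz = fz := by
  rw [pvAdvance]; exact dif_neg h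

lemma pvAdvance_step (cur : List Int) (fz : Int)
    (h : fz < (cur.length : Int) ∧ PySem.List.pyGetD cur fz 0 ≠ 0) :
    pvAdvance cur fz = pvAdvance cur (fz + 1) := by
  rw [pvAdvance]; exact dif_pos h

lemma getD_append_len (l r : List Int) (y d : Int) : (l ++ y :: r).getD l.length d = y := by
  induction l with
  | nil => rfl
  | cons a t ih => simpa using ih

lemma set_append_len (l r : List Int) (y v : Int) : (l ++ y :: r).set l.length v = l ++ v :: r := by
  induction l with
  | nil => rfl
  | cons a t ih => simpa using ih

-- invariant of A's shifting loop: a compacted nonzero prefix F, a zero run, the untouched rest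
lemma shift_inv (rest : List Int) : ∀ (F : List Int) (k n : Nat), 1 ≤ k →
    n = F.length + k + rest.length →
    ((PySem.List.enumerate rest ((F.length + k : Nat) : Int)).foldl (pvShiftStep n)
        (F ++ List.replicate k 0 ++ rest, ((F.length : Nat) : Int), false)).1
      = F ++ rest.filter (fun x => decide (x ≠ 0))
          ++ List.replicate (n - (F.length + (rest.filter (fun x => decide (x ≠ 0))).length)) 0 := by
  induction rest with
  | nil =>
    intro F k n hk hn
    simp only [List.length_nil] at hn
    simp only [PySem.List.enumerate_nil, List.foldl_nil, List.filter_nil, List.append_nil,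
      List.length_nil]
    have : n - (F.length + 0) = k := by omega
    rw [this]
  | cons x t ih =>
    intro F k n hk hn
    simp only [List.length_cons] at hn
    obtain ⟨k', rfl⟩ : ∃ k', k = k' + 1 := ⟨k - 1, by omega⟩
    rw [PySem.List.enumerate_cons, List.foldl_cons]
    by_cases hx : x = 0
    · -- num == 0: nothing is switched, the zero run grows by one
      subst hx
      have hlist : F ++ List.replicate (k' + 1) 0 ++ (0 : Int) :: t
          = F ++ List.replicate (k' + 1 + 1) 0 ++ t := by
        simp [List.replicate_succ', List.append_assoc]
      have hcur0 : PySem.List.pyGetD (F ++ List.replicate (k' + 1 + 1) 0 ++ t) ((F.length : Nat) : Int) 0 = 0 := by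
        rw [PySem.List.pyGetD_natCast]
        have : F ++ List.replicate (k' + 1 + 1) 0 ++ t
            = F ++ (0 : Int) :: (List.replicate (k' + 1) 0 ++ t) := by
          simp [List.replicate_succ]
        rw [this, getD_append_len]
      have hadv : pvAdvance (F ++ List.replicate (k' + 1 + 1) 0 ++ t) ((F.length : Nat) : Int)
          = ((F.length : Nat) : Int) := pvAdvance_stop _ _ (fun h => h.2 hcur0)
      have hstep : pvShiftStep n (F ++ List.replicate (k' + 1) 0 ++ (0 : Int) :: t, ((F.length : Nat) : Int), false)
          (((F.length + (k' + 1) : Nat) : Int), 0)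
          = (F ++ List.replicate (k' + 1 + 1) 0 ++ t, ((F.length : Nat) : Int), false) := by
        simp only [pvShiftStep, Bool.false_eq_true, if_false, ne_eq, not_true_eq_false]
        rw [hlist, hadv]
        have hd : ¬(((F.length : Nat) : Int) > (n : Int) - 1) := by push_cast; omega
        simp only [Prod.mk.injEq, true_and]
        exact decide_eq_false hd
      rw [hstep]
      have hstart : ((F.length + (k' + 1) : Nat) : Int) + 1 = ((F.length + (k' + 1 + 1) : Nat) : Int) := by
        push_cast; ring
      rw [hstart, ih F (k' + 1 + 1) n (by omega) (by omega)]
      simp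
    · -- num != 0: it is switched to position first_zero, the zero run slides right
      have hbig : F ++ List.replicate (k' + 1) 0 ++ x :: t
          = F ++ (0 : Int) :: (List.replicate k' 0 ++ x :: t) := by
        simp [List.replicate_succ]
      have hset1 : (F ++ List.replicate (k' + 1) 0 ++ x :: t).set F.length x
          = (F ++ x :: List.replicate k' 0) ++ x :: t := by
        rw [hbig, set_append_len]; simp
      have hlen1 : (F ++ x :: List.replicate k' 0).length = F.length + (k' + 1) := by
        simp
      have hset2 : ((F ++ x :: List.replicate k' 0) ++ x :: t).set (F.length + (k' + 1)) 0
          = (F ++ [x]) ++ List.replicate (k' + 1) 0 ++ t := by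
        rw [← hlen1, set_append_len]
        simp [List.replicate_succ']
      have hcur : PySem.List.pySetD (PySem.List.pySetD (F ++ List.replicate (k' + 1) 0 ++ x :: t)
            ((F.length : Nat) : Int) x) (((F.length + (k' + 1) : Nat) : Int)) 0
          = (F ++ [x]) ++ List.replicate (k' + 1) 0 ++ t := by
        rw [PySem.List.pySetD_natCast, PySem.List.pySetD_natCast, hset1, hset2]
      have hget1 : PySem.List.pyGetD ((F ++ [x]) ++ List.replicate (k' + 1) 0 ++ t) ((F.length : Nat) : Int) 0 = x := by
        rw [PySem.List.pyGetD_natCast]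
        have : (F ++ [x]) ++ List.replicate (k' + 1) 0 ++ t
            = F ++ x :: (List.replicate (k' + 1) 0 ++ t) := by simp
        rw [this, getD_append_len]
      have hget2 : PySem.List.pyGetD ((F ++ [x]) ++ List.replicate (k' + 1) 0 ++ t) (((F.length : Nat) : Int) + 1) 0 = 0 := by
        have hc : ((F.length : Nat) : Int) + 1 = ((F.length + 1 : Nat) : Int) := by push_cast; ring
        rw [hc, PySem.List.pyGetD_natCast]
        have h1 : (F ++ [x]) ++ List.replicate (k' + 1) 0 ++ t
            = (F ++ [x]) ++ (0 : Int) :: (List.replicate k' 0 ++ t) := by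
          simp [List.replicate_succ]
        have h2 : F.length + 1 = (F ++ [x]).length := by simp
        rw [h1, h2, getD_append_len]
      have hlenc : ((F ++ [x]) ++ List.replicate (k' + 1) 0 ++ t).length = n := by
        simp; omega
      have hadv : pvAdvance ((F ++ [x]) ++ List.replicate (k' + 1) 0 ++ t) ((F.length : Nat) : Int)
          = ((F.length : Nat) : Int) + 1 := by
        rw [pvAdvance_step _ _ ⟨by rw [hlenc]; push_cast; omega, by rw [hget1]; exact hx⟩]
        exact pvAdvance_stop _ _ (fun h => h.2 hget2)
      have hstep : pvShiftStep n (F ++ List.replicate (k' + 1) 0 ++ x :: t, ((F.length : Nat) : Int), false)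
          (((F.length + (k' + 1) : Nat) : Int), x)
          = ((F ++ [x]) ++ List.replicate (k' + 1) 0 ++ t, ((F.length : Nat) : Int) + 1, false) := by
        simp only [pvShiftStep, Bool.false_eq_true, if_false, ne_eq, hx, not_false_eq_true,
          if_pos]
        rw [hcur, hadv]
        have hd : ¬(((F.length : Nat) : Int) + 1 > (n : Int) - 1) := by push_cast; omega
        simp only [Prod.mk.injEq, true_and]
        exact decide_eq_false hd
      rw [hstep]
      have hstart : ((F.length + (k' + 1) : Nat) : Int) + 1 = (((F ++ [x]).length + (k' + 1) : Nat) : Int) := by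
        push_cast; simp; ring
      have hfz : ((F.length : Nat) : Int) + 1 = (((F ++ [x]).length : Nat) : Int) := by push_cast; simp
      rw [hstart, hfz, ih (F ++ [x]) (k' + 1) n (by omega) (by simp; omega)]
      have hpad : n - ((F ++ [x]).length + (t.filter (fun x => decide (x ≠ 0))).length)
          = n - (F.length + ((x :: t).filter (fun x => decide (x ≠ 0))).length) := by
        simp [List.filter_cons, hx]; omega
      rw [hpad]
      simp [List.filter_cons, hx]

lemma take_filter_all (m : List Int) (k : Nat) (hlt : ∀ (j : Nat) (hj : j < m.length), j < k → m[j] ≠ 0) :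
    (m.take k).filter (fun x => decide (x ≠ 0)) = m.take k := by
  apply List.filter_eq_self.mpr
  intro x hx
  rw [List.mem_iff_getElem] at hx
  obtain ⟨i, hi, rfl⟩ := hx
  simp only [List.getElem_take]
  simp only [List.length_take] at hi
  exact decide_eq_true (hlt i (by omega) (by omega))

-- ===== VERDICT (by name: the statement is the Claim_ definition above) =====
theorem solution_1710_4_spec : Claim_equal_solution_1710_4 := by
  intro nums _ _
  unfold Spec_solution_1710_4
  show solution_1710_4 nums = solution_1710_4_alt nums
  rw [solution_1710_4, solution_1710_4_alt]
  simp only [mergeA_eq, mergeB_eq]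
  set m := pvMergeRef nums with hm
  rcases h : m.findIdx? (fun x => decide (x = 0)) with _ | k
  · -- no zero anywhere: the guard returns early; filtering removes nothing
    rw [pvFirstZero_none m 0 h]
    have hall : ∀ x ∈ m, x ≠ 0 := by
      intro x hx
      have := List.findIdx?_eq_none_iff.mp h x hx
      simpa using this
    have hfi : m.filter (fun x => !decide (x = 0)) = m :=
      List.filter_eq_self.mpr (fun x hx => by simpa using hall x hx)
    simp [hfi]
  · rw [pvFirstZero_some m 0 k h]
    have hspec := List.findIdx?_eq_some_iff_findIdx_eq.mp h
    have hk : k < m.length := hspec.1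
    have h0 : m[k] = 0 := by
      have := @List.findIdx_getElem _ (fun x => decide (x = 0)) m (hspec.2 ▸ hk)
      simpa [hspec.2] using this
    have hlt : ∀ (j : Nat) (hj : j < m.length), j < k → m[j] ≠ 0 := by
      intro j hj hjk
      have := @List.not_of_lt_findIdx _ (fun x => decide (x = 0)) m j (hspec.2 ▸ hjk)
      simpa using this
    have hdecomp : m.take k ++ (0 : Int) :: m.drop (k + 1) = m := by
      rw [← h0, List.getElem_cons_drop, List.take_append_drop]
    have htf : (m.take k).filter (fun x => decide (x ≠ 0)) = m.take k := take_filter_all m k hlt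
    have hfm : m.filter (fun x => decide (x ≠ 0))
        = m.take k ++ (m.drop (k + 1)).filter (fun x => decide (x ≠ 0)) := by
      conv_lhs => rw [← hdecomp]
      rw [List.filter_append, htf]
      simp
    by_cases hedge : k = m.length - 1
    · -- the zero is the last element: A returns early, B's rebuild is the identity
      have hguard : (0 : Int) + (k : Int) = (m.length : Int) - 1 := by
        push_cast; omega
      rw [if_pos hguard]
      have hdrop : m.drop (k + 1) = [] := by
        apply List.drop_eq_nil_of_le; omega
      rw [hfm, hdrop]
      simp only [List.filter_nil, List.append_nil]
      have hpad : m.length - (m.take k).length = 1 := by simp [List.length_take]; omega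
      rw [hpad]
      conv_lhs => rw [← hdecomp, hdrop]
      simp [List.replicate_succ]
    · -- a zero strictly before the end: A runs its shifting loop
      have hguard : ¬((0 : Int) + (k : Int) = (m.length : Int) - 1) := by
        push_cast; omega
      rw [if_neg hguard]
      have hz : (0 : Int) + (k : Int) = ((k : Nat) : Int) := by push_cast; ring
      rw [hz]
      have hsl : PySem.List.slice m (some (((k : Nat) : Int) + 1)) none = m.drop (k + 1) := by
        have hc : ((k : Nat) : Int) + 1 = ((k + 1 : Nat) : Int) := by push_cast; ring
        rw [hc, PySem.List.slice_from _ (by positivity)]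
        simp
      rw [hsl]
      have hkt : (m.take k).length = k := by simp [List.length_take]; omega
      have hinit : m.take k ++ List.replicate 1 0 ++ m.drop (k + 1) = m := by
        conv_rhs => rw [← hdecomp]
        simp
      have hres := shift_inv (m.drop (k + 1)) (m.take k) 1 m.length (le_refl 1)
        (by simp [List.length_take, List.length_drop]; omega)
      rw [hkt, hinit] at hres
      have hc1 : ((k : Nat) : Int) + 1 = ((k + 1 : Nat) : Int) := by push_cast; ring
      rw [hc1, hres, hfm]
      have hlenf : m.length - (k + ((m.drop (k + 1)).filter (fun x => decide (x ≠ 0))).length)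
          = m.length - (m.take k ++ (m.drop (k + 1)).filter (fun x => decide (x ≠ 0))).length := by
        simp [List.length_append, hkt]
      rw [hlenf]
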